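-- pv_equiv track=rewrite | github.com/rhan0134/Python | Programmers/Lv.1_Handlingstr.py | solution
-- ===== SOURCE A (Python) =====
-- def solution(s):
--     answer = 0
--
--     if len(s) == 4:
--         for i in s:
--             if 48 <= ord(i) <=57:
--                 answer += 1
--
--         if answer == 4:
--             return True
--         else:
--             return False
--
--     elif len(s) == 6:
--         for i in s:
--             if 48 <= ord(i) <=57:
--                 answer += 1
--
--         if answer == 6:
--             return True
--         else:
--             return False
--
--     else:
--         return False
-- ===== SOURCE B (Python) =====
-- import re
--
-- _PIN = re.compile(r'[0-9]{4}|[0-9]{6}')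
--
-- def solution(s):
--     return bool(_PIN.fullmatch(s))
-- ===== Notes on version B (the rewrite author's own statement) =====
-- stated objective: idiomatic
-- what changed: Replaces the manual per-character digit-counting loop with length branches by a single anchored regex fullmatch on [0-9]{4}|[0-9]{6}.
import Mathlib
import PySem

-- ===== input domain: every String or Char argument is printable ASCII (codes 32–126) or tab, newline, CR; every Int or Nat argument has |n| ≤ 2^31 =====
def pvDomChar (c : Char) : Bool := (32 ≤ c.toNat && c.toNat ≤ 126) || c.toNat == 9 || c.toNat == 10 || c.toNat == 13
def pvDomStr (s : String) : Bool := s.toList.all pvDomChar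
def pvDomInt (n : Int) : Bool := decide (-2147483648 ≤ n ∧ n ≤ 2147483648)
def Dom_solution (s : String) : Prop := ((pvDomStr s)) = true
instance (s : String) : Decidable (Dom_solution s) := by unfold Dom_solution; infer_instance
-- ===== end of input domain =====

-- B replaces A's manual digit-counting loop and length branches with a single anchored
-- regex fullmatch on [0-9]{4}|[0-9]{6} (more idiomatic; same return value).
-- ===== PORT A =====
-- counts ASCII-digit chars like A's for-loop
def pvCountDig (cs : List Char) : Int :=
  cs.foldl (fun answer i => if 48 ≤ i.toNat ∧ i.toNat ≤ 57 then answer + 1 else answer) 0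

def solution (s : String) : Bool :=
  if s.toList.length = 4 then
    (if pvCountDig s.toList = 4 then true else false)
  else if s.toList.length = 6 then
    (if pvCountDig s.toList = 6 then true else false)
  else false

-- ===== PORT B =====
-- re.fullmatch(r'[0-9]{4}|[0-9]{6}', s): exactly the length-4 or length-6 all-ASCII-digit strings
def solution_alt (s : String) : Bool :=
  (s.toList.length == 4 || s.toList.length == 6) &&
    s.toList.all (fun c => 48 ≤ c.toNat && c.toNat ≤ 57)

-- ===== PRECONDITION & SPEC =====
def Spec_solution (s : String) (out : Bool) : Prop := out = solution_alt s
instance (s : String) (out : Bool) : Decidable (Spec_solution s out) := by unfold Spec_solution; infer_instance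

-- ===== CLAIM (what is proved, stated in full; the proofs are below) =====
def Claim_equal_solution : Prop := ∀ (s : String), Dom_solution s → Spec_solution s (solution s)

-- ===== LEMMAS AND PROOFS =====

-- ===== VERDICT (by name: the statement is the Claim_ definition above) =====
theorem pvCountDig_le (cs : List Char) (n : Int) :
    cs.foldl (fun answer i => if 48 ≤ i.toNat ∧ i.toNat ≤ 57 then answer + 1 else answer) n
      ≤ n + cs.length ∧
    (cs.foldl (fun answer i => if 48 ≤ i.toNat ∧ i.toNat ≤ 57 then answer + 1 else answer) n
      = n + cs.length ↔ ∀ c ∈ cs, 48 ≤ c.toNat ∧ c.toNat ≤ 57) := by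
  induction cs generalizing n with
  | nil => simp
  | cons c cs ih =>
    simp only [List.foldl_cons, List.length_cons]
    by_cases h : 48 ≤ c.toNat ∧ c.toNat ≤ 57
    · rcases ih (n+1) with ⟨h1, h2⟩
      simp only [if_pos h]
      constructor
      · omega
      · push_cast
        rw [show n + ((cs.length : Int) + 1) = (n+1) + cs.length by ring, h2]
        simp [h]
    · rcases ih n with ⟨h1, h2⟩
      simp only [if_neg h]
      refine ⟨by omega, ?_⟩
      constructor
      · intro he; exfalso; omega
      · intro hall; exact absurd (hall c (by simp)) h

theorem pvCountDig_spec (cs : List Char) :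
    (pvCountDig cs = cs.length ↔ ∀ c ∈ cs, 48 ≤ c.toNat ∧ c.toNat ≤ 57) := by
  simpa using (pvCountDig_le cs 0).2

theorem solution_spec : Claim_equal_solution := by
  intro s _
  unfold Spec_solution solution solution_alt
  have hsp := pvCountDig_spec s.toList
  by_cases hall : ∀ c ∈ s.toList, 48 ≤ c.toNat ∧ c.toNat ≤ 57
  · have hc : pvCountDig s.toList = (s.toList.length : Int) := hsp.2 hall
    by_cases h4 : s.toList.length = 4 <;> by_cases h6 : s.toList.length = 6 <;>
      simp_all [List.all_eq_true]
  · have hc : pvCountDig s.toList ≠ (s.toList.length : Int) := fun h => hall (hsp.1 h)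
    have hne : (s.toList.all fun c => decide (48 ≤ c.toNat) && decide (c.toNat ≤ 57)) = false := by
      rw [← Bool.not_eq_true]
      simp only [List.all_eq_true, Bool.and_eq_true, decide_eq_true_eq, not_forall]
      by_contra hcon
      push_neg at hcon
      exact hall fun c hcm => hcon c hcm
    by_cases h4 : s.toList.length = 4 <;> by_cases h6 : s.toList.length = 6 <;>
      simp_all
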